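-- pv_equiv track=rewrite | github.com/ankun-eric/auto_dev_bnbbaijkgj | backend/app/api/merchant_dashboard.py | _aggregate_status_code
-- ===== SOURCE A (Python) =====
-- from typing import Any, Dict, List, Optional
--
-- def _aggregate_status_code(status_codes: List[str]) -> str:
--     """聚合多个订单状态码为该格的整体状态色：
--     优先级：verified > arrived > pending > cancelled。
--     若全部为 cancelled 才返回 cancelled。
--     """
--     if not status_codes:
--         return "pending"
--     if any(s == "verified" for s in status_codes):
--         return "verified"
--     if any(s == "arrived" for s in status_codes):
--         return "arrived"
--     if any(s == "pending" for s in status_codes):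
--         return "pending"
--     return "cancelled"
-- ===== SOURCE B (Python) =====
-- def _aggregate_status_code(status_codes):
--     if not status_codes:
--         return "pending"
--     rank = {"verified": 0, "arrived": 1, "pending": 2}
--     best = min(rank.get(s, 3) for s in status_codes)
--     return ["verified", "arrived", "pending", "cancelled"][best]
-- ===== Notes on version B (the rewrite author's own statement) =====
-- stated objective: idiomatic
-- what changed: Replaced the four sequential any() scans with a single pass computing the minimum priority rank via a rank table, then mapping the best rank back to its name.
import Mathlib
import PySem

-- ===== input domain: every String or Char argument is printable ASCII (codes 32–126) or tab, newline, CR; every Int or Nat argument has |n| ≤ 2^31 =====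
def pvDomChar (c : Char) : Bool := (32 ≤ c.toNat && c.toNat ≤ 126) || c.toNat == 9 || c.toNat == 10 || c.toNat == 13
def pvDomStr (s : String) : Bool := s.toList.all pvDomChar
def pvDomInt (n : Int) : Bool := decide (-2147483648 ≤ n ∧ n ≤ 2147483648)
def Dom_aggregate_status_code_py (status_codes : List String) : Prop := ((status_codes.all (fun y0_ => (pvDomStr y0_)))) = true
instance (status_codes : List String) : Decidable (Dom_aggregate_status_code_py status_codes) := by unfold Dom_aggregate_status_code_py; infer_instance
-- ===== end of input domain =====

-- B replaces A's four sequential any() scans by one min-reduction over a priority rank table (idiomatic).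
-- ===== PORT A =====
def aggregate_status_code_py (status_codes : List String) : String :=
  if status_codes = [] then "pending"
  else if status_codes.any (fun s => s == "verified") then "verified"
  else if status_codes.any (fun s => s == "arrived") then "arrived"
  else if status_codes.any (fun s => s == "pending") then "pending"
  else "cancelled"

-- ===== PORT B =====
-- rank.get(s, 3)
def pvRankOf (s : String) : Nat :=
  (PySem.Dict.ofList [("verified", 0), ("arrived", 1), ("pending", 2)]).getD s 3

def aggregate_status_code_py_alt (status_codes : List String) : String :=
  match status_codes with
  | [] => "pending"
  | h :: t =>
    let best := t.foldl (fun b s => min b (pvRankOf s)) (pvRankOf h)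
    ["verified", "arrived", "pending", "cancelled"].getD best ""

-- ===== PRECONDITION & SPEC =====
def Spec_aggregate_status_code_py (status_codes : List String) (out : String) : Prop := out = aggregate_status_code_py_alt status_codes
instance (status_codes : List String) (out : String) : Decidable (Spec_aggregate_status_code_py status_codes out) := by unfold Spec_aggregate_status_code_py; infer_instance

-- ===== CLAIM (what is proved, stated in full; the proofs are below) =====
def Claim_equal_aggregate_status_code_py : Prop := ∀ (status_codes : List String), Dom_aggregate_status_code_py status_codes → Spec_aggregate_status_code_py status_codes (aggregate_status_code_py status_codes)

-- ===== LEMMAS AND PROOFS =====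

-- the fold B runs, with an arbitrary accumulator
def pvFold (t : List String) (a : Nat) : Nat := t.foldl (fun b s => min b (pvRankOf s)) a

lemma pvRankOf_eq (s : String) :
    pvRankOf s = if s = "verified" then 0 else if s = "arrived" then 1 else if s = "pending" then 2 else 3 := by
  by_cases h1 : s = "verified"
  · subst h1; decide
  by_cases h2 : s = "arrived"
  · subst h2; decide
  by_cases h3 : s = "pending"
  · subst h3; decide
  have hof : PySem.Dict.ofList [("verified", (0 : Nat)), ("arrived", 1), ("pending", 2)]
      = PySem.Dict.mk [("verified", 0), ("arrived", 1), ("pending", 2)] := rfl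
  simp [pvRankOf, hof, PySem.Dict.getD, PySem.Dict.get?, h1, h2, h3,
    Ne.symm h1, Ne.symm h2, Ne.symm h3]

lemma pvRankOf_le (s : String) : pvRankOf s ≤ 3 := by
  rw [pvRankOf_eq]; split_ifs <;> omega

-- pulling the accumulator out of the fold
lemma pvFold_min (t : List String) (a : Nat) (ha : a ≤ 3) : pvFold t a = min a (pvFold t 3) := by
  induction t generalizing a with
  | nil => simp [pvFold]; omega
  | cons u t ih =>
    have h1 : pvFold (u :: t) a = pvFold t (min a (pvRankOf u)) := rfl
    have h2 : pvFold (u :: t) 3 = pvFold t (pvRankOf u) := by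
      simp [pvFold, Nat.min_eq_right (pvRankOf_le u)]
    have hru := pvRankOf_le u
    rw [h1, h2, ih _ (by omega), ih _ hru]
    omega

-- the fold computes exactly the rank A's any-scan cascade selects
lemma pvFold_eq (l : List String) :
    pvFold l 3 = if l.any (fun s => s == "verified") then 0
      else if l.any (fun s => s == "arrived") then 1
      else if l.any (fun s => s == "pending") then 2 else 3 := by
  induction l with
  | nil => simp [pvFold]
  | cons s t ih =>
    have hcons : pvFold (s :: t) 3 = min (pvRankOf s) (pvFold t 3) := by
      have h2 : pvFold (s :: t) 3 = pvFold t (pvRankOf s) := by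
        simp [pvFold, Nat.min_eq_right (pvRankOf_le s)]
      rw [h2, pvFold_min t _ (pvRankOf_le s)]
    rw [hcons, ih, pvRankOf_eq]
    by_cases h1 : s = "verified" <;> by_cases h2 : s = "arrived" <;> by_cases h3 : s = "pending" <;>
      cases hV : t.any (fun s => s == "verified") <;>
      cases hA : t.any (fun s => s == "arrived") <;>
      cases hP : t.any (fun s => s == "pending") <;>
      simp_all <;>
      first
        | exact fun hh => hV _ hh rfl
        | (have nV : "verified" ∉ t := fun hh => hV _ hh rfl
           have nA : "arrived" ∉ t := fun hh => hA _ hh rfl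
           have nP : "pending" ∉ t := fun hh => hP _ hh rfl
           simp [nV, nA, nP])
        | (have nV : "verified" ∉ t := fun hh => hV _ hh rfl
           have nA : "arrived" ∉ t := fun hh => hA _ hh rfl
           simp [nV, nA])

-- ===== VERDICT (by name: the statement is the Claim_ definition above) =====
theorem aggregate_status_code_py_spec : Claim_equal_aggregate_status_code_py := by
  intro l _
  unfold Spec_aggregate_status_code_py
  cases l with
  | nil => rfl
  | cons h t =>
    have hidx : pvFold (h :: t) 3 = t.foldl (fun b s => min b (pvRankOf s)) (pvRankOf h) := by
      show pvFold t (min 3 (pvRankOf h)) = _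
      rw [Nat.min_eq_right (pvRankOf_le h)]
      rfl
    have halt : aggregate_status_code_py_alt (h :: t)
        = ["verified", "arrived", "pending", "cancelled"].getD (pvFold (h :: t) 3) "" := by
      rw [hidx]; rfl
    rw [halt, pvFold_eq]
    simp only [aggregate_status_code_py]
    split_ifs with he hV hA hP <;> simp_all
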